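-- pv_equiv track=rewrite | github.com/Predragon/ThirdVoiceApp | app.py | get_message_stats
-- ===== SOURCE A (Python) =====
-- from typing import Dict, Any, Optional, List
--
-- def get_message_stats(history: list) -> Dict[str, int]:
--     """Calculate statistics for message history"""
--     if not history:
--         return {'total': 0, 'coached': 0, 'translated': 0}
--
--     coached = sum(1 for entry in history if entry.get('type') == 'coach')
--     translated = sum(1 for entry in history if entry.get('type') == 'translate')
--
--     return {
--         'total': len(history),
--         'coached': coached,
--         'translated': translated
--     }
-- ===== SOURCE B (Python) =====
-- from typing import Dict
--
-- def get_message_stats(history: list) -> Dict[str, int]: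
--     """Calculate statistics for message history"""
--     total = coached = translated = 0
--     for entry in history:
--         total += 1
--         t = entry.get('type')
--         if t == 'coach':
--             coached += 1
--         elif t == 'translate':
--             translated += 1
--     return {'total': total, 'coached': coached, 'translated': translated}
-- ===== Notes on version B (the rewrite author's own statement) =====
-- stated objective: simpler
-- what changed: Replaces the empty-list early return plus two separate filtered generator-sum passes (and a len call) with one explicit loop that maintains a triple accumulator (total, coached, translated), classifying each entry's type once via an if/elif chain.
import Mathlib
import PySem

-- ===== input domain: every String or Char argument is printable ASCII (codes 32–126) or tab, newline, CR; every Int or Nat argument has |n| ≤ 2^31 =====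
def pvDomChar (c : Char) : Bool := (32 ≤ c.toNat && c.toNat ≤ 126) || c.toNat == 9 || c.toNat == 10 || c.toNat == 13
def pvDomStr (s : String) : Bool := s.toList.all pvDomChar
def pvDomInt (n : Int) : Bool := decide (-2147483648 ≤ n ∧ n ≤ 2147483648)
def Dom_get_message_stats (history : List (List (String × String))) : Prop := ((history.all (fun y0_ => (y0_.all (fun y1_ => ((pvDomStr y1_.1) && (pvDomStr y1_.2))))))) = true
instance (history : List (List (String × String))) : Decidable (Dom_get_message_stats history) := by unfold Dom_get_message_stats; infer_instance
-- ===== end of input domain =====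

-- B replaces A's empty-list early return and two filtered generator-sum passes with one
-- explicit loop maintaining a (total, coached, translated) accumulator triple (simpler; same O(n)).

-- ===== PORT A =====
def get_message_stats (history : List (List (String × String))) : List (String × Int) :=
  if history = [] then [("total", (0 : Int)), ("coached", (0 : Int)), ("translated", (0 : Int))]
  else
    let coached : Int := history.foldl
      (fun acc e => if (PySem.Dict.mk e).get? "type" == some "coach" then acc + 1 else acc) 0
    let translated : Int := history.foldl
      (fun acc e => if (PySem.Dict.mk e).get? "type" == some "translate" then acc + 1 else acc) 0
    [("total", (history.length : Int)), ("coached", coached), ("translated", translated)]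

-- ===== PORT B =====
def get_message_stats_alt (history : List (List (String × String))) : List (String × Int) :=
  let s := history.foldl
    (fun (s : Int × Int × Int) e =>
      let total := s.1 + 1
      let t := (PySem.Dict.mk e).get? "type"
      if t == some "coach" then (total, s.2.1 + 1, s.2.2)
      else if t == some "translate" then (total, s.2.1, s.2.2 + 1)
      else (total, s.2.1, s.2.2))
    ((0 : Int), (0 : Int), (0 : Int))
  [("total", s.1), ("coached", s.2.1), ("translated", s.2.2)]

-- ===== PRECONDITION & SPEC =====
def Spec_get_message_stats (history : List (List (String × String))) (out : List (String × Int)) : Prop := out = get_message_stats_alt history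
instance (history : List (List (String × String))) (out : List (String × Int)) : Decidable (Spec_get_message_stats history out) := by unfold Spec_get_message_stats; infer_instance

-- ===== CLAIM (what is proved, stated in full; the proofs are below) =====
def Claim_equal_get_message_stats : Prop := ∀ (history : List (List (String × String))), Dom_get_message_stats history → Spec_get_message_stats history (get_message_stats history)

-- ===== LEMMAS AND PROOFS =====
theorem loop_triple (l : List (List (String × String))) : ∀ (a b c : Int),
    l.foldl
      (fun (s : Int × Int × Int) e =>
        let total := s.1 + 1
        let t := (PySem.Dict.mk e).get? "type"
        if t == some "coach" then (total, s.2.1 + 1, s.2.2)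
        else if t == some "translate" then (total, s.2.1, s.2.2 + 1)
        else (total, s.2.1, s.2.2)) (a, b, c)
    = (a + l.length,
       b + (l.countP (fun e => (PySem.Dict.mk e).get? "type" == some "coach") : Int),
       c + (l.countP (fun e => (PySem.Dict.mk e).get? "type" == some "translate") : Int)) := by
  induction l with
  | nil => intro a b c; simp
  | cons e rest ih =>
    intro a b c
    rw [List.foldl_cons]
    by_cases hc : ((PySem.Dict.mk e).get? "type" == some "coach") = true
    · have ht : ((PySem.Dict.mk e).get? "type" == some "translate") = false := by
        rw [eq_of_beq hc]; decide
      simp only [hc, ht, if_true, ih, List.countP_cons, List.length_cons]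
      refine Prod.ext ?_ (Prod.ext ?_ ?_) <;> simp <;> omega
    · by_cases ht : ((PySem.Dict.mk e).get? "type" == some "translate") = true
      · simp only [hc, ht, if_true, ih, List.countP_cons, List.length_cons]
        refine Prod.ext ?_ (Prod.ext ?_ ?_) <;> simp <;> omega
      · simp only [hc, ht, if_true, ih, List.countP_cons, List.length_cons]
        refine Prod.ext ?_ (Prod.ext ?_ ?_) <;> simp <;> omega

-- ===== VERDICT (by name: the statement is the Claim_ definition above) =====
theorem get_message_stats_spec : Claim_equal_get_message_stats := by
  intro history _
  unfold Spec_get_message_stats get_message_stats get_message_stats_alt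
  simp only [loop_triple, zero_add,
    PySem.List.foldl_if_add_one]
  rcases history with _ | ⟨e, rest⟩
  · rfl
  · simp [if_neg (List.cons_ne_nil e rest)]
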